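-- pv_equiv track=rewrite | github.com/LouriNoel/contests | adventofcode/2024/06/aoc-202406.py | move_from_wall
-- ===== SOURCE A (Python) =====
-- DIRS = ["^", ">", "v", "<"]  # ordered: next direction (%4) is a right turn
--
-- INCRS = {
--     "^": (0, -1),  # dx, dy
--     ">": (+1, 0),
--     "v": (0, +1),
--     "<": (-1, 0)
-- }
--
-- def move_straight(walls: list[tuple[int, int]], W: int, H: int, x0: int, y0: int, d: str) -> tuple[int, int, int, int]:
--     """ Return the segment when moving straight from (x0, y0) towards `d`
--     until the guard hits a wall or goes OOB (will stop on the last free cell).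
--     """
--     x, y = x0, y0
--     dx, dy = INCRS[d]
--     while 0 <= x+dx < W and 0 <= y+dy < H and (x+dx, y+dy) not in walls:
--         x, y = x+dx, y+dy
--     return x0, y0, x, y
--
-- def move_from_wall(walls: list[tuple[int, int]], W: int, H: int, wx: int, wy: int) -> list[tuple[str, tuple[int, int, int, int]]]:
--     """ Try moving straight from each side of the wall at (wx, wy)
--     towards the right (as if the guard hits the wall at the start)
--     and until they hit a wall or goes OOB (will stop on the last free cell).
--
--     Return the tuple (direction, segment).
--     """
--     result = []
--     for side, (dx, dy) in INCRS.items():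
--         x0, y0 = wx+dx, wy+dy
--         if 0 <= x0 < W and 0 <= y0 < H and (x0, y0) not in walls:
--             d = DIRS[(DIRS.index(side) - 1) % 4]  # left from the wall = right from the opposite
--             result.append((d, move_straight(walls, W, H, x0, y0, d)))
--     return result
-- ===== SOURCE B (Python) =====
-- # B: instead of stepping cell by cell, compute the stopping coordinate directly
-- # as the nearest wall on the same row/column beyond the start (or the boundary).
--
-- def _stop(coords, bound, start, sign):
--     """Last free coordinate when moving from `start` with step `sign` (+1/-1)
--     along a line with walls at `coords`, line length `bound`."""
--     if sign < 0:
--         best = 0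
--         for c in coords:
--             if c < start and c + 1 > best:
--                 best = c + 1
--         return best
--     best = bound - 1
--     for c in coords:
--         if c > start and c - 1 < best:
--             best = c - 1
--     return best
--
-- def move_from_wall(walls, W, H, wx, wy):
--     result = []
--     for side, d, dx, dy in (("^", "<", 0, -1), (">", "^", 1, 0), ("v", ">", 0, 1), ("<", "v", -1, 0)):
--         x0, y0 = wx + dx, wy + dy
--         if 0 <= x0 < W and 0 <= y0 < H and (x0, y0) not in walls:
--             if d == "<":
--                 seg = (x0, y0, _stop([a for a, b in walls if b == y0], W, x0, -1), y0)
--             elif d == ">":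
--                 seg = (x0, y0, _stop([a for a, b in walls if b == y0], W, x0, +1), y0)
--             elif d == "^":
--                 seg = (x0, y0, x0, _stop([b for a, b in walls if a == x0], H, y0, -1))
--             else:
--                 seg = (x0, y0, x0, _stop([b for a, b in walls if a == x0], H, y0, +1))
--             result.append((d, seg))
--     return result
-- ===== Notes on version B (the rewrite author's own statement) =====
-- stated objective: faster
-- what changed: Replaces the cell-by-cell while-loop walk with a direct computation of the stopping cell: one scan of the walls on the start's row/column finds the nearest blocking wall beyond the start (or the grid boundary) for each of the four directions.
import Mathlib
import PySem

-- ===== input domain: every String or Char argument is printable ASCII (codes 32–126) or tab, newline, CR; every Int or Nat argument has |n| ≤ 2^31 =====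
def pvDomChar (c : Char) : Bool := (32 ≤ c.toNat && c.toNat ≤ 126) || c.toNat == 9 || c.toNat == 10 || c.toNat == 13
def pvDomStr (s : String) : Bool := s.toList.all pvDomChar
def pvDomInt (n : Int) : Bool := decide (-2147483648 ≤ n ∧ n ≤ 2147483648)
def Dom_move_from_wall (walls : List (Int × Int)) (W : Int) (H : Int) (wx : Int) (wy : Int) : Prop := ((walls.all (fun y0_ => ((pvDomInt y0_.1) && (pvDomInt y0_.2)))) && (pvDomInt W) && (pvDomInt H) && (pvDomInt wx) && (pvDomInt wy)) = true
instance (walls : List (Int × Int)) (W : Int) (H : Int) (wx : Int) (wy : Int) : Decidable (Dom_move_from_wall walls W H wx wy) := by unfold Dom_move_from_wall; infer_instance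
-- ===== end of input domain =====

-- B replaces A's cell-by-cell walk with a direct nearest-wall-on-the-line computation (one scan of the walls per direction).

-- ===== PORT A =====
-- A's single `while` loop in move_straight, specialized to each of the four literal
-- directions it is entered with (dx,dy ∈ {(0,-1),(1,0),(0,1),(-1,0)}), state (x,y) as in A.
def goL (walls : List (Int × Int)) (W H y x : Int) : Int :=
  if h : 0 ≤ x - 1 ∧ x - 1 < W ∧ 0 ≤ y ∧ y < H ∧ (x - 1, y) ∉ walls then
    goL walls W H y (x - 1)
  else x
termination_by x.toNat
decreasing_by omega

def goR (walls : List (Int × Int)) (W H y x : Int) : Int :=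
  if h : 0 ≤ x + 1 ∧ x + 1 < W ∧ 0 ≤ y ∧ y < H ∧ (x + 1, y) ∉ walls then
    goR walls W H y (x + 1)
  else x
termination_by (W - x).toNat
decreasing_by omega

def goU (walls : List (Int × Int)) (W H x y : Int) : Int :=
  if h : 0 ≤ x ∧ x < W ∧ 0 ≤ y - 1 ∧ y - 1 < H ∧ (x, y - 1) ∉ walls then
    goU walls W H x (y - 1)
  else y
termination_by y.toNat
decreasing_by omega

def goD (walls : List (Int × Int)) (W H x y : Int) : Int :=
  if h : 0 ≤ x ∧ x < W ∧ 0 ≤ y + 1 ∧ y + 1 < H ∧ (x, y + 1) ∉ walls then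
    goD walls W H x (y + 1)
  else y
termination_by (H - y).toNat
decreasing_by omega

def move_straight (walls : List (Int × Int)) (W H x0 y0 : Int) (d : String) : Int × Int × Int × Int :=
  if d = "^" then (x0, y0, x0, goU walls W H x0 y0)
  else if d = ">" then (x0, y0, goR walls W H y0 x0, y0)
  else if d = "v" then (x0, y0, x0, goD walls W H x0 y0)
  else if d = "<" then (x0, y0, goL walls W H y0 x0, y0)
  else (x0, y0, x0, y0)  -- Python raises KeyError here; unreachable from move_from_wall

def dirsA : List String := ["^", ">", "v", "<"]

-- d = DIRS[(DIRS.index(side) - 1) % 4]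
def turnLeftA (side : String) : String :=
  match PySem.List.index? dirsA side with
  | some i => (PySem.List.pyGet? dirsA (PySem.Int.mod ((i : Int) - 1) 4)).getD ""
  | none => ""  -- Python raises ValueError; unreachable

def move_from_wall (walls : List (Int × Int)) (W : Int) (H : Int) (wx : Int) (wy : Int) : List (String × (Int × Int × Int × Int)) :=
  [("^", (0 : Int), (-1 : Int)), (">", 1, 0), ("v", 0, 1), ("<", -1, 0)].foldl
    (fun result sdd =>
      let x0 := wx + sdd.2.1
      let y0 := wy + sdd.2.2
      if 0 ≤ x0 ∧ x0 < W ∧ 0 ≤ y0 ∧ y0 < H ∧ (x0, y0) ∉ walls then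
        let d := turnLeftA sdd.1
        result ++ [(d, move_straight walls W H x0 y0 d)]
      else result) []

-- ===== PORT B =====
-- _stop from Source B
def stopB (coords : List Int) (bound start sign : Int) : Int :=
  if sign < 0 then
    coords.foldl (fun best c => if c < start ∧ c + 1 > best then c + 1 else best) 0
  else
    coords.foldl (fun best c => if c > start ∧ c - 1 < best then c - 1 else best) (bound - 1)

def move_from_wall_alt (walls : List (Int × Int)) (W : Int) (H : Int) (wx : Int) (wy : Int) : List (String × (Int × Int × Int × Int)) :=
  [("^", "<", (0 : Int), (-1 : Int)), (">", "^", 1, 0), ("v", ">", 0, 1), ("<", "v", -1, 0)].foldl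
    (fun result t =>
      let d := t.2.1
      let x0 := wx + t.2.2.1
      let y0 := wy + t.2.2.2
      if 0 ≤ x0 ∧ x0 < W ∧ 0 ≤ y0 ∧ y0 < H ∧ (x0, y0) ∉ walls then
        let seg :=
          if d = "<" then (x0, y0, stopB ((walls.filter (fun p => p.2 == y0)).map Prod.fst) W x0 (-1), y0)
          else if d = ">" then (x0, y0, stopB ((walls.filter (fun p => p.2 == y0)).map Prod.fst) W x0 1, y0)
          else if d = "^" then (x0, y0, x0, stopB ((walls.filter (fun p => p.1 == x0)).map Prod.snd) H y0 (-1))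
          else (x0, y0, x0, stopB ((walls.filter (fun p => p.1 == x0)).map Prod.snd) H y0 1)
        result ++ [(d, seg)]
      else result) []

-- ===== PRECONDITION & SPEC =====
def Spec_move_from_wall (walls : List (Int × Int)) (W : Int) (H : Int) (wx : Int) (wy : Int) (out : List (String × (Int × Int × Int × Int))) : Prop := out = move_from_wall_alt walls W H wx wy
instance (walls : List (Int × Int)) (W : Int) (H : Int) (wx : Int) (wy : Int) (out : List (String × (Int × Int × Int × Int))) : Decidable (Spec_move_from_wall walls W H wx wy out) := by unfold Spec_move_from_wall; infer_instance

-- ===== CLAIM (what is proved, stated in full; the proofs are below) =====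
def Claim_equal_move_from_wall : Prop := ∀ (walls : List (Int × Int)) (W : Int) (H : Int) (wx : Int) (wy : Int), Dom_move_from_wall walls W H wx wy → Spec_move_from_wall walls W H wx wy (move_from_wall walls W H wx wy)

-- ===== LEMMAS AND PROOFS =====

-- membership in the extracted row/column coordinate lists
lemma mem_rowCoords (walls : List (Int × Int)) (y a : Int) :
    a ∈ (walls.filter (fun p => p.2 == y)).map Prod.fst ↔ (a, y) ∈ walls := by
  simp only [List.mem_map, List.mem_filter, beq_iff_eq]
  constructor
  · rintro ⟨⟨p1, p2⟩, ⟨hm, rfl⟩, rfl⟩; exact hm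
  · intro h; exact ⟨(a, y), ⟨h, rfl⟩, rfl⟩

lemma mem_colCoords (walls : List (Int × Int)) (x b : Int) :
    b ∈ (walls.filter (fun p => p.1 == x)).map Prod.snd ↔ (x, b) ∈ walls := by
  simp only [List.mem_map, List.mem_filter, beq_iff_eq]
  constructor
  · rintro ⟨⟨p1, p2⟩, ⟨hm, rfl⟩, rfl⟩; exact hm
  · intro h; exact ⟨(x, b), ⟨h, rfl⟩, rfl⟩

-- the max-fold (sign < 0 branch of stopB)
lemma negFold_mono (s : Int) : ∀ (cs : List Int) (acc : Int),
    acc ≤ cs.foldl (fun best c => if c < s ∧ c + 1 > best then c + 1 else best) acc := by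
  intro cs
  induction cs with
  | nil => intro acc; simp
  | cons c cs ih =>
    intro acc
    refine le_trans ?_ (ih _)
    dsimp only; split_ifs with h <;> omega

lemma negFold_ub (s B : Int) : ∀ (cs : List Int) (acc : Int), acc ≤ B →
    (∀ c ∈ cs, c < s → c + 1 ≤ B) →
    cs.foldl (fun best c => if c < s ∧ c + 1 > best then c + 1 else best) acc ≤ B := by
  intro cs
  induction cs with
  | nil => intro acc h _; simpa using h
  | cons c cs ih =>
    intro acc hacc hall
    apply ih
    · dsimp only; split_ifs with h
      · exact hall c (by simp) h.1
      · exact hacc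
    · intro c' hc'; exact hall c' (by simp [hc'])

lemma negFold_mem (s : Int) : ∀ (cs : List Int) (acc c : Int), c ∈ cs → c < s →
    c + 1 ≤ cs.foldl (fun best c => if c < s ∧ c + 1 > best then c + 1 else best) acc := by
  intro cs
  induction cs with
  | nil => intro _ _ h; simp at h
  | cons c0 cs ih =>
    intro acc c hc hcs
    rcases List.mem_cons.mp hc with rfl | hmem
    · refine le_trans ?_ (negFold_mono s cs _)
      dsimp only; split_ifs with h <;> omega
    · exact ih _ c hmem hcs

lemma negFold_shift (s : Int) : ∀ (cs : List Int) (acc : Int), (s - 1) ∉ cs →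
    cs.foldl (fun best c => if c < s - 1 ∧ c + 1 > best then c + 1 else best) acc
      = cs.foldl (fun best c => if c < s ∧ c + 1 > best then c + 1 else best) acc := by
  intro cs
  induction cs with
  | nil => intro _ _; rfl
  | cons c cs ih =>
    intro acc hnot
    have hne : c ≠ s - 1 := fun h => hnot (by simp [h])
    have : (if c < s - 1 ∧ c + 1 > acc then c + 1 else acc)
         = (if c < s ∧ c + 1 > acc then c + 1 else acc) := by
      split_ifs with h1 h2 h2 <;> first | rfl | omega
    simp only [List.foldl_cons, this]
    exact ih _ (fun h => hnot (by simp [h]))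

-- the min-fold (sign ≥ 0 branch of stopB)
lemma posFold_mono (s : Int) : ∀ (cs : List Int) (acc : Int),
    cs.foldl (fun best c => if c > s ∧ c - 1 < best then c - 1 else best) acc ≤ acc := by
  intro cs
  induction cs with
  | nil => intro acc; simp
  | cons c cs ih =>
    intro acc
    refine le_trans (ih _) ?_
    dsimp only; split_ifs with h <;> omega

lemma posFold_lb (s B : Int) : ∀ (cs : List Int) (acc : Int), B ≤ acc →
    (∀ c ∈ cs, c > s → B ≤ c - 1) →
    B ≤ cs.foldl (fun best c => if c > s ∧ c - 1 < best then c - 1 else best) acc := by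
  intro cs
  induction cs with
  | nil => intro acc h _; simpa using h
  | cons c cs ih =>
    intro acc hacc hall
    apply ih
    · dsimp only; split_ifs with h
      · exact hall c (by simp) h.1
      · exact hacc
    · intro c' hc'; exact hall c' (by simp [hc'])

lemma posFold_mem (s : Int) : ∀ (cs : List Int) (acc c : Int), c ∈ cs → c > s →
    cs.foldl (fun best c => if c > s ∧ c - 1 < best then c - 1 else best) acc ≤ c - 1 := by
  intro cs
  induction cs with
  | nil => intro _ _ h; simp at h
  | cons c0 cs ih =>
    intro acc c hc hcs
    rcases List.mem_cons.mp hc with rfl | hmem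
    · refine le_trans (posFold_mono s cs _) ?_
      dsimp only; split_ifs with h <;> omega
    · exact ih _ c hmem hcs

lemma posFold_shift (s : Int) : ∀ (cs : List Int) (acc : Int), (s + 1) ∉ cs →
    cs.foldl (fun best c => if c > s + 1 ∧ c - 1 < best then c - 1 else best) acc
      = cs.foldl (fun best c => if c > s ∧ c - 1 < best then c - 1 else best) acc := by
  intro cs
  induction cs with
  | nil => intro _ _; rfl
  | cons c cs ih =>
    intro acc hnot
    have hne : c ≠ s + 1 := fun h => hnot (by simp [h])
    have : (if c > s + 1 ∧ c - 1 < acc then c - 1 else acc)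
         = (if c > s ∧ c - 1 < acc then c - 1 else acc) := by
      split_ifs with h1 h2 h2 <;> first | rfl | omega
    simp only [List.foldl_cons, this]
    exact ih _ (fun h => hnot (by simp [h]))

-- A's step loops compute B's closed form, on the inputs move_from_wall reaches them with
lemma goL_eq (walls : List (Int × Int)) (W H y : Int) (hy0 : 0 ≤ y) (hyH : y < H) :
    ∀ (n : ℕ) (x : Int), x.toNat ≤ n → 0 ≤ x → x < W →
    goL walls W H y x = stopB ((walls.filter (fun p => p.2 == y)).map Prod.fst) W x (-1) := by
  intro n
  induction n with
  | zero =>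
    intro x hn hx0 hxW
    have hx : x = 0 := by omega
    subst hx
    rw [goL]
    rw [dif_neg (by rintro ⟨h1, -⟩; omega)]
    unfold stopB
    rw [if_pos (by norm_num)]
    refine (le_antisymm ?_ (negFold_mono 0 _ 0)).symm
    exact negFold_ub 0 0 _ 0 le_rfl (fun c _ hc => by omega)
  | succ n ih =>
    intro x hn hx0 hxW
    set cs := (walls.filter (fun p => p.2 == y)).map Prod.fst with hcs
    rw [goL]
    by_cases h : 0 ≤ x - 1 ∧ x - 1 < W ∧ 0 ≤ y ∧ y < H ∧ (x - 1, y) ∉ walls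
    · rw [dif_pos h]
      have hrec := ih (x - 1) (by omega) h.1 h.2.1
      rw [hrec]
      have hmem : (x - 1) ∉ cs := by
        rw [hcs, mem_rowCoords]; exact h.2.2.2.2
      unfold stopB
      rw [if_pos (by norm_num), if_pos (by norm_num)]
      exact negFold_shift x cs 0 hmem
    · rw [dif_neg h]
      unfold stopB
      rw [if_pos (by norm_num)]
      push Not at h
      rcases lt_or_ge (x - 1) 0 with hneg | hge
      · have hx : x = 0 := by omega
        subst hx
        refine le_antisymm ?_ (negFold_mono 0 cs 0) |>.symm
        exact negFold_ub 0 0 cs 0 le_rfl (fun c _ hc => by omega)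
      · have hw : (x - 1, y) ∈ walls := h hge (by omega) hy0 hyH
        have hwc : (x - 1) ∈ cs := by rw [hcs, mem_rowCoords]; exact hw
        refine (le_antisymm ?_ ?_).symm
        · exact negFold_ub x x cs 0 (by omega) (fun c _ hc => by omega)
        · have := negFold_mem x cs 0 (x - 1) hwc (by omega)
          omega

lemma goR_eq (walls : List (Int × Int)) (W H y : Int) (hy0 : 0 ≤ y) (hyH : y < H) :
    ∀ (n : ℕ) (x : Int), (W - x).toNat ≤ n → 0 ≤ x → x < W →
    goR walls W H y x = stopB ((walls.filter (fun p => p.2 == y)).map Prod.fst) W x 1 := by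
  intro n
  induction n with
  | zero => intro x hn hx0 hxW; omega
  | succ n ih =>
    intro x hn hx0 hxW
    set cs := (walls.filter (fun p => p.2 == y)).map Prod.fst with hcs
    rw [goR]
    by_cases h : 0 ≤ x + 1 ∧ x + 1 < W ∧ 0 ≤ y ∧ y < H ∧ (x + 1, y) ∉ walls
    · rw [dif_pos h]
      rw [ih (x + 1) (by omega) (by omega) h.2.1]
      have hmem : (x + 1) ∉ cs := by rw [hcs, mem_rowCoords]; exact h.2.2.2.2
      unfold stopB
      rw [if_neg (by norm_num), if_neg (by norm_num)]
      exact posFold_shift x cs (W - 1) hmem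
    · rw [dif_neg h]
      unfold stopB
      rw [if_neg (by norm_num)]
      push Not at h
      rcases lt_or_ge (x + 1) W with hlt | hge
      · have hw : (x + 1, y) ∈ walls := h (by omega) hlt hy0 hyH
        have hwc : (x + 1) ∈ cs := by rw [hcs, mem_rowCoords]; exact hw
        refine (le_antisymm ?_ ?_).symm
        · have := posFold_mem x cs (W - 1) (x + 1) hwc (by omega)
          omega
        · exact posFold_lb x x cs (W - 1) (by omega) (fun c _ hc => by omega)
      · have hx : x = W - 1 := by omega
        subst hx
        refine (le_antisymm (posFold_mono _ cs _) ?_).symm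
        exact posFold_lb (W - 1) (W - 1) cs (W - 1) le_rfl (fun c _ hc => by omega)

lemma goU_eq (walls : List (Int × Int)) (W H x : Int) (hx0 : 0 ≤ x) (hxW : x < W) :
    ∀ (n : ℕ) (y : Int), y.toNat ≤ n → 0 ≤ y → y < H →
    goU walls W H x y = stopB ((walls.filter (fun p => p.1 == x)).map Prod.snd) H y (-1) := by
  intro n
  induction n with
  | zero =>
    intro y hn hy0 hyH
    have hy : y = 0 := by omega
    subst hy
    rw [goU]
    rw [dif_neg (by rintro ⟨-, -, h1, -⟩; omega)]
    unfold stopB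
    rw [if_pos (by norm_num)]
    refine (le_antisymm ?_ (negFold_mono 0 _ 0)).symm
    exact negFold_ub 0 0 _ 0 le_rfl (fun c _ hc => by omega)
  | succ n ih =>
    intro y hn hy0 hyH
    set cs := (walls.filter (fun p => p.1 == x)).map Prod.snd with hcs
    rw [goU]
    by_cases h : 0 ≤ x ∧ x < W ∧ 0 ≤ y - 1 ∧ y - 1 < H ∧ (x, y - 1) ∉ walls
    · rw [dif_pos h]
      rw [ih (y - 1) (by omega) h.2.2.1 h.2.2.2.1]
      have hmem : (y - 1) ∉ cs := by rw [hcs, mem_colCoords]; exact h.2.2.2.2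
      unfold stopB
      rw [if_pos (by norm_num), if_pos (by norm_num)]
      exact negFold_shift y cs 0 hmem
    · rw [dif_neg h]
      unfold stopB
      rw [if_pos (by norm_num)]
      push Not at h
      rcases lt_or_ge (y - 1) 0 with hneg | hge
      · have hy : y = 0 := by omega
        subst hy
        refine le_antisymm ?_ (negFold_mono 0 cs 0) |>.symm
        exact negFold_ub 0 0 cs 0 le_rfl (fun c _ hc => by omega)
      · have hw : (x, y - 1) ∈ walls := h hx0 hxW hge (by omega)
        have hwc : (y - 1) ∈ cs := by rw [hcs, mem_colCoords]; exact hw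
        refine (le_antisymm ?_ ?_).symm
        · exact negFold_ub y y cs 0 (by omega) (fun c _ hc => by omega)
        · have := negFold_mem y cs 0 (y - 1) hwc (by omega)
          omega

lemma goD_eq (walls : List (Int × Int)) (W H x : Int) (hx0 : 0 ≤ x) (hxW : x < W) :
    ∀ (n : ℕ) (y : Int), (H - y).toNat ≤ n → 0 ≤ y → y < H →
    goD walls W H x y = stopB ((walls.filter (fun p => p.1 == x)).map Prod.snd) H y 1 := by
  intro n
  induction n with
  | zero => intro y hn hy0 hyH; omega
  | succ n ih =>
    intro y hn hy0 hyH
    set cs := (walls.filter (fun p => p.1 == x)).map Prod.snd with hcs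
    rw [goD]
    by_cases h : 0 ≤ x ∧ x < W ∧ 0 ≤ y + 1 ∧ y + 1 < H ∧ (x, y + 1) ∉ walls
    · rw [dif_pos h]
      rw [ih (y + 1) (by omega) (by omega) h.2.2.2.1]
      have hmem : (y + 1) ∉ cs := by rw [hcs, mem_colCoords]; exact h.2.2.2.2
      unfold stopB
      rw [if_neg (by norm_num), if_neg (by norm_num)]
      exact posFold_shift y cs (H - 1) hmem
    · rw [dif_neg h]
      unfold stopB
      rw [if_neg (by norm_num)]
      push Not at h
      rcases lt_or_ge (y + 1) H with hlt | hge
      · have hw : (x, y + 1) ∈ walls := h hx0 hxW (by omega) hlt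
        have hwc : (y + 1) ∈ cs := by rw [hcs, mem_colCoords]; exact hw
        refine (le_antisymm ?_ ?_).symm
        · have := posFold_mem y cs (H - 1) (y + 1) hwc (by omega)
          omega
        · exact posFold_lb y y cs (H - 1) (by omega) (fun c _ hc => by omega)
      · have hy : y = H - 1 := by omega
        subst hy
        refine (le_antisymm (posFold_mono _ cs _) ?_).symm
        exact posFold_lb (H - 1) (H - 1) cs (H - 1) le_rfl (fun c _ hc => by omega)

lemma turnLeftA_up : turnLeftA "^" = "<" := by decide
lemma turnLeftA_right : turnLeftA ">" = "^" := by decide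
lemma turnLeftA_down : turnLeftA "v" = ">" := by decide
lemma turnLeftA_left : turnLeftA "<" = "v" := by decide

lemma step_eq {α : Type} (c : Prop) [Decidable c] (r₁ r₂ : List α) (a b : α)
    (hr : r₁ = r₂) (hab : c → a = b) :
    (if c then r₁ ++ [a] else r₁) = (if c then r₂ ++ [b] else r₂) := by
  split_ifs with h
  · rw [hr, hab h]
  · exact hr

lemma ms_left (walls : List (Int × Int)) (W H x0 y0 : Int)
    (h1 : 0 ≤ x0) (h2 : x0 < W) (h3 : 0 ≤ y0) (h4 : y0 < H) :
    move_straight walls W H x0 y0 "<"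
      = (x0, y0, stopB ((walls.filter (fun p => p.2 == y0)).map Prod.fst) W x0 (-1), y0) := by
  have hg := goL_eq walls W H y0 h3 h4 x0.toNat x0 le_rfl h1 h2
  simp [move_straight, hg]

lemma ms_right (walls : List (Int × Int)) (W H x0 y0 : Int)
    (h1 : 0 ≤ x0) (h2 : x0 < W) (h3 : 0 ≤ y0) (h4 : y0 < H) :
    move_straight walls W H x0 y0 ">"
      = (x0, y0, stopB ((walls.filter (fun p => p.2 == y0)).map Prod.fst) W x0 1, y0) := by
  have hg := goR_eq walls W H y0 h3 h4 (W - x0).toNat x0 le_rfl h1 h2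
  simp [move_straight, hg]

lemma ms_up (walls : List (Int × Int)) (W H x0 y0 : Int)
    (h1 : 0 ≤ x0) (h2 : x0 < W) (h3 : 0 ≤ y0) (h4 : y0 < H) :
    move_straight walls W H x0 y0 "^"
      = (x0, y0, x0, stopB ((walls.filter (fun p => p.1 == x0)).map Prod.snd) H y0 (-1)) := by
  have hg := goU_eq walls W H x0 h1 h2 y0.toNat y0 le_rfl h3 h4
  simp [move_straight, hg]

lemma ms_down (walls : List (Int × Int)) (W H x0 y0 : Int)
    (h1 : 0 ≤ x0) (h2 : x0 < W) (h3 : 0 ≤ y0) (h4 : y0 < H) :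
    move_straight walls W H x0 y0 "v"
      = (x0, y0, x0, stopB ((walls.filter (fun p => p.1 == x0)).map Prod.snd) H y0 1) := by
  have hg := goD_eq walls W H x0 h1 h2 (H - y0).toNat y0 le_rfl h3 h4
  simp [move_straight, hg]

-- ===== VERDICT (by name: the statement is the Claim_ definition above) =====
theorem move_from_wall_spec : Claim_equal_move_from_wall := by
  intro walls W H wx wy _
  unfold Spec_move_from_wall move_from_wall move_from_wall_alt
  simp only [List.foldl_cons, List.foldl_nil, turnLeftA_up, turnLeftA_right, turnLeftA_down,
    turnLeftA_left]
  refine step_eq _ _ _ _ _ (step_eq _ _ _ _ _ (step_eq _ _ _ _ _ (step_eq _ _ _ _ _ rfl ?_) ?_) ?_) ?_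
  · rintro ⟨h1, h2, h3, h4, h5⟩
    simp
    exact ms_left walls W H wx (wy + -1) (by omega) (by omega) (by omega) (by omega)
  · rintro ⟨h1, h2, h3, h4, h5⟩
    simp
    exact ms_up walls W H (wx + 1) wy (by omega) (by omega) (by omega) (by omega)
  · rintro ⟨h1, h2, h3, h4, h5⟩
    simp
    exact ms_right walls W H wx (wy + 1) (by omega) (by omega) (by omega) (by omega)
  · rintro ⟨h1, h2, h3, h4, h5⟩
    simp
    exact ms_down walls W H (wx + -1) wy (by omega) (by omega) (by omega) (by omega)
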